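-- pv_equiv track=rewrite | github.com/cuttalo/depscope | scripts/ingest_known_bugs.py | pick_severity
-- ===== SOURCE A (Python) =====
-- def pick_severity(labels: list[str]) -> str:
--     """Map GitHub labels to severity bucket."""
--     labels_lower = [lbl.lower() for lbl in labels]
--     if any("critical" in lbl or "p0" in lbl for lbl in labels_lower):
--         return "critical"
--     if any("high" in lbl or "p1" in lbl for lbl in labels_lower):
--         return "high"
--     if any("low" in lbl or "minor" in lbl for lbl in labels_lower):
--         return "low"
--     return "medium"
-- ===== SOURCE B (Python) =====
-- def pick_severity(labels: list[str]) -> str: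
--     """Map GitHub labels to severity bucket (single pass, min-rank)."""
--     best = 3
--     for lbl in labels:
--         l = lbl.lower()
--         if "critical" in l or "p0" in l:
--             r = 0
--         elif "high" in l or "p1" in l:
--             r = 1
--         elif "low" in l or "minor" in l:
--             r = 2
--         else:
--             r = 3
--         if r < best:
--             best = r
--     return ("critical", "high", "low", "medium")[best]
-- ===== Notes on version B (the rewrite author's own statement) =====
-- stated objective: alternative
-- what changed: Replaces A's three separate any() scans over the lowered label list with a single pass that assigns each label a priority rank and keeps the minimum, mapping the final rank to the bucket name.
import Mathlib
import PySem

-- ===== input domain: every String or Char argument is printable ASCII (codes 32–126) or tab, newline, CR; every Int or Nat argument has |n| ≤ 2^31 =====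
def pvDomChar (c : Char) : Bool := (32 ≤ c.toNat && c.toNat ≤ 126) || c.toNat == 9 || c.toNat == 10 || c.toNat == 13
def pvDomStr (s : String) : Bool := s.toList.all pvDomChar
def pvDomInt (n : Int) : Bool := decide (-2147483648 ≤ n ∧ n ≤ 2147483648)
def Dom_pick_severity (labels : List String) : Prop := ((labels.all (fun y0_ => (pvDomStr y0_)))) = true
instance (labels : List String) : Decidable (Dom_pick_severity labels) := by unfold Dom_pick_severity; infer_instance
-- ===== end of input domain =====

-- B replaces A's three any() scans over the lowered labels with a single min-rank pass (alternative decomposition, same cost).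


-- ===== PORT A =====
def pick_severity (labels : List String) : String :=
  let labels_lower := labels.map (fun lbl => PySem.Str.lower lbl)
  if labels_lower.any (fun lbl => PySem.Str.isIn "critical" lbl || PySem.Str.isIn "p0" lbl) then "critical"
  else if labels_lower.any (fun lbl => PySem.Str.isIn "high" lbl || PySem.Str.isIn "p1" lbl) then "high"
  else if labels_lower.any (fun lbl => PySem.Str.isIn "low" lbl || PySem.Str.isIn "minor" lbl) then "low"
  else "medium"

-- ===== PORT B =====
-- rank of one label: 0 critical, 1 high, 2 low, 3 unmatched
def pvRankOf (lbl : String) : Nat :=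
  let l := PySem.Str.lower lbl
  if PySem.Str.isIn "critical" l || PySem.Str.isIn "p0" l then 0
  else if PySem.Str.isIn "high" l || PySem.Str.isIn "p1" l then 1
  else if PySem.Str.isIn "low" l || PySem.Str.isIn "minor" l then 2
  else 3

def pick_severity_alt (labels : List String) : String :=
  let best := labels.foldl (fun best lbl => min best (pvRankOf lbl)) 3
  if best = 0 then "critical" else if best = 1 then "high" else if best = 2 then "low" else "medium"

-- ===== PRECONDITION & SPEC =====
def Spec_pick_severity (labels : List String) (out : String) : Prop := out = pick_severity_alt labels
instance (labels : List String) (out : String) : Decidable (Spec_pick_severity labels out) := by unfold Spec_pick_severity; infer_instance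

-- ===== CLAIM (what is proved, stated in full; the proofs are below) =====
def Claim_equal_pick_severity : Prop := ∀ (labels : List String), Dom_pick_severity labels → Spec_pick_severity labels (pick_severity labels)

-- ===== LEMMAS AND PROOFS =====

-- ===== VERDICT (by name: the statement is the Claim_ definition above) =====

-- foldl of min as min of a foldr
theorem pv_foldl_min (labels : List String) (acc : Nat) (hacc : acc ≤ 3) :
    labels.foldl (fun best lbl => min best (pvRankOf lbl)) acc
      = min acc (labels.foldr (fun lbl r => min (pvRankOf lbl) r) 3) := by
  induction labels generalizing acc with
  | nil => simp; omega
  | cons l ls ih =>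
    simp only [List.foldl_cons, List.foldr_cons, ih (min acc (pvRankOf l)) (by omega)]
    omega

-- the minimum rank equals A's category cascade
theorem pv_foldr_char (labels : List String) :
    labels.foldr (fun lbl r => min (pvRankOf lbl) r) 3
      = (if labels.any (fun lbl => PySem.Str.isIn "critical" (PySem.Str.lower lbl) || PySem.Str.isIn "p0" (PySem.Str.lower lbl)) then 0
         else if labels.any (fun lbl => PySem.Str.isIn "high" (PySem.Str.lower lbl) || PySem.Str.isIn "p1" (PySem.Str.lower lbl)) then 1
         else if labels.any (fun lbl => PySem.Str.isIn "low" (PySem.Str.lower lbl) || PySem.Str.isIn "minor" (PySem.Str.lower lbl)) then 2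
         else 3) := by
  induction labels with
  | nil => simp
  | cons l ls ih =>
    have hr : List.foldr (fun lbl r => min (pvRankOf lbl) r) 3 (l :: ls)
        = min (pvRankOf l) (List.foldr (fun lbl r => min (pvRankOf lbl) r) 3 ls) := rfl
    rw [hr, ih]
    simp only [List.any_cons]
    have hk : pvRankOf l
        = (if (PySem.Str.isIn "critical" (PySem.Str.lower l) || PySem.Str.isIn "p0" (PySem.Str.lower l)) then 0
           else if (PySem.Str.isIn "high" (PySem.Str.lower l) || PySem.Str.isIn "p1" (PySem.Str.lower l)) then 1
           else if (PySem.Str.isIn "low" (PySem.Str.lower l) || PySem.Str.isIn "minor" (PySem.Str.lower l)) then 2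
           else 3) := rfl
    rw [hk]
    rcases Bool.dichotomy (PySem.Str.isIn "critical" (PySem.Str.lower l) || PySem.Str.isIn "p0" (PySem.Str.lower l)) with hc | hc <;>
    rcases Bool.dichotomy (PySem.Str.isIn "high" (PySem.Str.lower l) || PySem.Str.isIn "p1" (PySem.Str.lower l)) with hh | hh <;>
    rcases Bool.dichotomy (PySem.Str.isIn "low" (PySem.Str.lower l) || PySem.Str.isIn "minor" (PySem.Str.lower l)) with hl | hl <;>
    simp only [hc, hh, hl, Bool.false_or, Bool.true_or] <;> norm_num <;> split_ifs <;> omega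

theorem pick_severity_spec : Claim_equal_pick_severity := by
  intro labels _
  unfold Spec_pick_severity pick_severity pick_severity_alt
  rw [pv_foldl_min labels 3 (by omega), pv_foldr_char]
  simp only [List.any_map, Function.comp_def]
  split_ifs <;> first | rfl | omega
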